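-- pv_equiv track=rewrite | github.com/gun8121/CodingInterview | 프로그래머스/unrated/181918. 배열 만들기 4/배열 만들기 4.py | solution
-- ===== SOURCE A (Python) =====
-- def solution(arr):
--     stk = []
--     i = 0
--     while i < len(arr):
--         if len(stk) == 0:
--             stk.append(arr[i])
--             i += 1
--         elif len(stk) != 0 and stk[-1] < arr[i]:
--             stk.append(arr[i])
--             i += 1
--         elif len(stk) != 0 and stk[-1] >= arr[i]:
--             stk.pop()
--     return stk
-- ===== SOURCE B (Python) =====
-- def solution(arr):
--     if not arr:
--         return []
--     m = arr[-1]
--     res = [m]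
--     for x in reversed(arr[:-1]):
--         if x < m:
--             res.append(x)
--             m = x
--     return res[::-1]
-- ===== Notes on version B (the rewrite author's own statement) =====
-- stated objective: simpler
-- what changed: Replaced the push/pop monotonic stack with a single right-to-left pass that keeps a running minimum and collects the strict suffix-minima, then reverses; no stack and no pops.
import Mathlib
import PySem

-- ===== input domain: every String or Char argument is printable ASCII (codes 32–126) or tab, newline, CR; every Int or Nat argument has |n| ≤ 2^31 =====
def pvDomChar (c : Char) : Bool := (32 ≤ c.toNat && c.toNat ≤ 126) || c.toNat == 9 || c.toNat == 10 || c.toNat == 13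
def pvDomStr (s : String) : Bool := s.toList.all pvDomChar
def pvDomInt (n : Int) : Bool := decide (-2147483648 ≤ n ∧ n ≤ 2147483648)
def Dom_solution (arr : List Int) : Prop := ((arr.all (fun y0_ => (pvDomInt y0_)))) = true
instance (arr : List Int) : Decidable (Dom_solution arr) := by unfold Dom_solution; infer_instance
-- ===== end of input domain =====

-- B replaces A's push/pop monotonic stack with a single right-to-left running-minimum pass (simpler; same return value).

-- ===== PORT A =====
-- the while loop of A: i the index, stk the stack (end of list = top of stack)
def solutionLoop (arr : List Int) (stk : List Int) (i : Nat) : List Int :=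
  if h : i < arr.length then
    if stk.isEmpty then
      solutionLoop arr (stk ++ [arr[i]]) (i + 1)
    else if stk.getLast! < arr[i] then
      solutionLoop arr (stk ++ [arr[i]]) (i + 1)
    else
      solutionLoop arr stk.dropLast i
  else
    stk
termination_by 2 * (arr.length - i) + stk.length
decreasing_by
  · simp; omega
  · simp; omega
  · have : stk ≠ [] := by simpa [List.isEmpty_iff] using (by assumption : ¬ stk.isEmpty = true)
    have : 0 < stk.length := List.length_pos_iff.mpr this
    simp [List.length_dropLast]; omega

def solution (arr : List Int) : List Int := solutionLoop arr [] 0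

-- ===== PORT B =====
def solution_alt (arr : List Int) : List Int :=
  match arr with
  | [] => []
  | _ :: _ =>
    let m := arr.getLast!
    let p := (arr.dropLast).reverse.foldl
      (fun (st : List Int × Int) x => if x < st.2 then (st.1 ++ [x], x) else st) ([m], m)
    p.1.reverse

-- ===== PRECONDITION & SPEC =====
def Spec_solution (arr : List Int) (out : List Int) : Prop := out = solution_alt arr
instance (arr : List Int) (out : List Int) : Decidable (Spec_solution arr out) := by unfold Spec_solution; infer_instance

-- ===== CLAIM (what is proved, stated in full; the proofs are below) =====
def Claim_equal_solution : Prop := ∀ (arr : List Int), Dom_solution arr → Spec_solution arr (solution arr)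

-- ===== LEMMAS AND PROOFS =====

-- the strict suffix-minima of a nonempty list, together with its minimum (junk on [])
def sm : List Int → List Int × Int
  | [] => ([], 0)
  | [x] => ([x], x)
  | x :: y :: t =>
    let p := sm (y :: t)
    if x < p.2 then (x :: p.1, x) else p

theorem getLast_bang_cons (b c : Int) (t : List Int) :
    (b :: c :: t).getLast! = (c :: t).getLast! := rfl

theorem getLast_bang_concat (s : List Int) (x : Int) : (s ++ [x]).getLast! = x := by
  induction s with
  | nil => rfl
  | cons a s ih =>
    rw [List.cons_append]
    cases h : s ++ [x] with
    | nil => simp at h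
    | cons c t => rw [getLast_bang_cons, ← h, ih]

theorem takeWhile_concat_not {p : Int → Bool} {x : Int} (s : List Int) (hx : p x = false) :
    (s ++ [x]).takeWhile p = s.takeWhile p := by
  induction s with
  | nil => simp [List.takeWhile, hx]
  | cons a s ih =>
    by_cases hp : p a
    · simp [List.takeWhile, hp, ih]
    · simp [List.takeWhile, hp]

theorem takeWhile_lt_concat_lt {a m : Int} (s : List Int) (ham : a < m) :
    ((s.takeWhile (· < a)) ++ [a]).takeWhile (· < m) = s.takeWhile (· < a) ++ [a] := by
  apply List.takeWhile_eq_self_iff.mpr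
  intro t ht
  rcases List.mem_append.mp ht with h | h
  · have := List.mem_takeWhile_imp h
    simp at this ⊢
    omega
  · simp at h
    subst h
    simpa using ham

theorem takeWhile_lt_concat_ge {a m : Int} (s : List Int) (hma : m ≤ a) :
    ((s.takeWhile (· < a)) ++ [a]).takeWhile (· < m) = s.takeWhile (· < m) := by
  induction s with
  | nil =>
    have ham : ¬ (a < m) := by omega
    simp [List.takeWhile, ham]
  | cons b s ih =>
    by_cases hb : b < a
    · by_cases hbm : b < m
      · simp [List.takeWhile, hb, hbm] at ih ⊢
        exact ih
      · simp [List.takeWhile, hb, hbm]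
    · have hbm : ¬ (b < m) := by omega
      have ham : ¬ (a < m) := by omega
      simp [List.takeWhile, hb, hbm, ham]

theorem loop_step (arr : List Int) (i : Nat) (hi : i < arr.length) :
    ∀ stk : List Int, stk.Pairwise (· < ·) →
    solutionLoop arr stk i = solutionLoop arr (stk.takeWhile (· < arr[i]) ++ [arr[i]]) (i + 1) := by
  intro stk
  induction stk using List.reverseRecOn with
  | nil => intro _; rw [solutionLoop]; simp [hi]
  | append_singleton s x ih =>
    intro hchain
    have hsx : ∀ t ∈ s, t < x := by
      intro t ht
      exact (List.pairwise_append.mp hchain).2.2 t ht x (by simp)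
    by_cases hx : x < arr[i]
    · have hall : (s ++ [x]).takeWhile (· < arr[i]) = s ++ [x] := by
        apply List.takeWhile_eq_self_iff.mpr
        intro t ht
        rcases List.mem_append.mp ht with h | h
        · have := hsx t h; simp; omega
        · simp at h; simp [h, hx]
      rw [solutionLoop]
      simp [hi, hx, hall]
    · rw [solutionLoop]
      have hne : ¬ (s ++ [x]).isEmpty := by simp
      have hlast : (s ++ [x]).getLast! = x := getLast_bang_concat s x
      have hdrop : (s ++ [x]).dropLast = s := by simp
      simp only [hi, dif_pos, hne, hlast, hx, if_neg, not_false_iff, hdrop,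
        Bool.false_eq_true]
      rw [ih (List.Pairwise.sublist (by simp) hchain)]
      rw [takeWhile_concat_not s (by simp [hx])]

theorem loop_main : ∀ (l : List Int) (arr stk : List Int) (i : Nat),
    arr.drop i = l → l ≠ [] → stk.Pairwise (· < ·) →
    solutionLoop arr stk i = stk.takeWhile (· < (sm l).2) ++ (sm l).1 := by
  intro l
  induction l with
  | nil => intro _ _ _ h hne; exact absurd rfl hne
  | cons a l' ih =>
    intro arr stk i hdrop _ hchain
    have hi : i < arr.length := by
      by_contra h
      rw [List.drop_eq_nil_of_le (by omega)] at hdrop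
      exact (List.cons_ne_nil a l') hdrop.symm
    have hget : arr[i] = a := by
      have := List.drop_eq_getElem_cons hi
      rw [hdrop] at this
      exact (List.cons.injEq _ _ _ _ ▸ this).1.symm
    have hdrop' : arr.drop (i + 1) = l' := by
      have := List.drop_eq_getElem_cons hi
      rw [hdrop] at this
      exact ((List.cons.injEq _ _ _ _ ▸ this).2).symm
    have hchain' : (stk.takeWhile (· < a) ++ [a]).Pairwise (· < ·) := by
      apply List.pairwise_append.mpr
      refine ⟨List.Pairwise.sublist (List.takeWhile_sublist _) hchain, by simp, ?_⟩
      intro t ht y hy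
      simp at hy; subst hy
      have := List.mem_takeWhile_imp ht
      simpa using this
    rw [loop_step arr i hi stk hchain, hget]
    cases l' with
    | nil =>
      rw [solutionLoop]
      have : ¬ (i + 1 < arr.length) := by
        have : arr.length ≤ i + 1 := by
          have := List.drop_eq_nil_iff.mp hdrop'
          omega
        omega
      simp only [this, dif_neg, not_false_iff]
      have hsm : sm [a] = ([a], a) := rfl
      rw [hsm]
    | cons b t =>
      rw [ih arr _ (i + 1) hdrop' (by simp) hchain']
      set p := sm (b :: t) with hp
      show _ = stk.takeWhile (· < (sm (a :: b :: t)).2) ++ (sm (a :: b :: t)).1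
      by_cases ham : a < p.2
      · have h1 := takeWhile_lt_concat_lt (a := a) (m := p.2) stk ham
        simp only [sm, ← hp, ham, if_pos]
        rw [h1]
        simp
      · have h1 := takeWhile_lt_concat_ge (a := a) (m := p.2) stk (by omega)
        simp only [sm, ← hp, ham, if_neg, not_false_iff]
        rw [h1]

theorem solution_eq_sm (arr : List Int) (h : arr ≠ []) : solution arr = (sm arr).1 := by
  unfold solution
  rw [loop_main arr arr [] 0 (by simp) h (by simp)]
  simp

theorem alt_fold (b : Int) : ∀ l : List Int,
    l.reverse.foldl (fun (st : List Int × Int) x => if x < st.2 then (st.1 ++ [x], x) else st) ([b], b)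
      = ((sm (l ++ [b])).1.reverse, (sm (l ++ [b])).2) := by
  intro l
  induction l with
  | nil => simp [sm]
  | cons x l' ih =>
    rw [List.reverse_cons, List.foldl_append, ih]
    obtain ⟨y, t, hlb⟩ : ∃ y t, l' ++ [b] = y :: t := by
      cases l' with
      | nil => exact ⟨b, [], rfl⟩
      | cons y t => exact ⟨y, t ++ [b], by simp⟩
    rw [List.cons_append, hlb]
    by_cases hx : x < (sm (y :: t)).2
    · simp [sm, hx]
    · simp [sm, hx]

theorem alt_eq_sm (arr : List Int) (h : arr ≠ []) : solution_alt arr = (sm arr).1 := by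
  induction arr using List.reverseRecOn with
  | nil => exact absurd rfl h
  | append_singleton l b _ =>
    have hcons : ∃ y t, l ++ [b] = y :: t := by
      cases l with
      | nil => exact ⟨b, [], rfl⟩
      | cons y t => exact ⟨y, t ++ [b], by simp⟩
    obtain ⟨y, t, hyt⟩ := hcons
    unfold solution_alt
    rw [hyt]
    simp only [← hyt]
    have hlast : (l ++ [b]).getLast! = b := getLast_bang_concat l b
    have hdl : (l ++ [b]).dropLast = l := by simp
    rw [hlast, hdl, alt_fold b l]
    simp

-- ===== VERDICT (by name: the statement is the Claim_ definition above) =====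
theorem solution_spec : Claim_equal_solution := by
  intro arr _
  unfold Spec_solution
  cases h : arr with
  | nil =>
    rw [solution, solutionLoop]
    simp [solution_alt]
  | cons a t =>
    rw [← h, solution_eq_sm arr (by simp [h]), alt_eq_sm arr (by simp [h])]
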